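-- pv_equiv track=rewrite | github.com/Jirapawee-R/DataProg_HW4_640631114 | main.py | create_possible_number
-- ===== SOURCE A (Python) =====
-- def create_possible_number(input_list):
--     if len(input_list) == 0:
--         return input_list
--     elif len(input_list) == 1:
--         return input_list
--     else:
--         result = []
--
--         # Find all sample space of number that could create from number in list
--         # Example x = {1,2,3}
--         # all possible number that could be created is {123, 132, 213, 231, 312, 321}
--         for i in range(len(input_list)):
--             # Define first element in list
--             # Example: define a = [1] from x = {1,2,3}
--             a = input_list[i]
--
--             # Create another list to collect other remaining element which is not the element in 'a'
--             # Example: in_list = [2,3] | input_list[:i] = [] | input_list[i+1:] = [2,3]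
--             in_list = input_list[:i] + input_list[i+1:]
--
--             # Generate all possible value that start with element 'a'
--             # Example loop 1: j.a = 2 , j.in_list = 3 >> a+j = 23 >> result = [123]
--             # Example loop 2: j.a = 3 , j.in_list = 2 >> result = 32 >> result = [132]
--             for j in create_possible_number(in_list):
--                 result.append(a + j)
--
--         return result
-- ===== SOURCE B (Python) =====
-- def create_possible_number(input_list):
--     if len(input_list) == 0:
--         return input_list
--     # iterative frontier expansion: (prefix, remaining) pairs, one level per element
--     frontier = [("", input_list)]
--     for _ in range(len(input_list)):
--         frontier = [(p + rem[i], rem[:i] + rem[i + 1:])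
--                     for (p, rem) in frontier for i in range(len(rem))]
--     return [p for (p, _) in frontier]
-- ===== Notes on version B (the rewrite author's own statement) =====
-- stated objective: alternative
-- what changed: Replaces A's recursion (pick each first element, recurse on the rest, prepend) by an iterative breadth-first frontier of (prefix, remaining) pairs expanded once per element, producing the same results in the same order.
import Mathlib
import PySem

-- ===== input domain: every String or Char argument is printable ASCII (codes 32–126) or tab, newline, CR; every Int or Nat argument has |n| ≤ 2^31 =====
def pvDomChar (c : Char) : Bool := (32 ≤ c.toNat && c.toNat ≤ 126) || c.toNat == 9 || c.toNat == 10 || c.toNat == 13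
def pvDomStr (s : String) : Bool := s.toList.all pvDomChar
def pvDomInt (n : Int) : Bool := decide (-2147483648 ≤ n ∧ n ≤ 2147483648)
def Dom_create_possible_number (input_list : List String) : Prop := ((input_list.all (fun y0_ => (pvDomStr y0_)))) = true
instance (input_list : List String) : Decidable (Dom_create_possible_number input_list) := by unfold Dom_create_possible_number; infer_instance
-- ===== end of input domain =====

-- B replaces A's recursive first-element decomposition by an iterative frontier expansion
-- of (prefix, remaining) pairs; same output, same order (objective: alternative).

-- ===== PORT A =====
def create_possible_number (input_list : List String) : List String :=
  if input_list.length = 0 then input_list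
  else if input_list.length = 1 then input_list
  else
    -- a = input_list[i] and in_list = input_list[:i] + input_list[i+1:] are inlined
    (List.range input_list.length).attach.foldl
      (fun result i =>
        (create_possible_number
            (PySem.List.slice input_list none (some (i.1 : Int)) ++
              PySem.List.slice input_list (some ((i.1 : Int) + 1)) none)).foldl
          (fun r j => r ++ [PySem.List.pyGetD input_list (i.1 : Int) "" ++ j]) result)
      []
termination_by input_list.length
decreasing_by
  have hi : i.1 < input_list.length := List.mem_range.mp i.2
  have h1 := PySem.List.slice_to_natCast input_list i.1
  have h2 := PySem.List.slice_from input_list (a := (i.1 : Int) + 1) (by omega)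
  rw [h1, h2]
  simp only [List.length_append, List.length_take, List.length_drop]
  omega

-- ===== PORT B =====
def pvStep (frontier : List (String × List String)) : List (String × List String) :=
  frontier.flatMap (fun pr =>
    (List.range pr.2.length).map (fun (i : Nat) =>
      (pr.1 ++ PySem.List.pyGetD pr.2 (i : Int) "",
       PySem.List.slice pr.2 none (some (i : Int)) ++
       PySem.List.slice pr.2 (some ((i : Int) + 1)) none)))

def create_possible_number_alt (input_list : List String) : List String :=
  if input_list = [] then input_list
  else
    ((List.range input_list.length).foldl (fun fr _ => pvStep fr)
      [("", input_list)]).map Prod.fst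

-- ===== PRECONDITION & SPEC =====
def Spec_create_possible_number (input_list : List String) (out : List String) : Prop := out = create_possible_number_alt input_list
instance (input_list : List String) (out : List String) : Decidable (Spec_create_possible_number input_list out) := by unfold Spec_create_possible_number; infer_instance

-- ===== CLAIM (what is proved, stated in full; the proofs are below) =====
def Claim_equal_create_possible_number : Prop := ∀ (input_list : List String), Dom_create_possible_number input_list → Spec_create_possible_number input_list (create_possible_number input_list)

-- ===== LEMMAS AND PROOFS =====

-- xs[:i] ++ xs[i+1:] as take/drop
lemma pvSlicePair (xs : List String) (i : Nat) :
    PySem.List.slice xs none (some (i : Int)) ++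
      PySem.List.slice xs (some ((i : Int) + 1)) none =
      xs.take i ++ xs.drop (i + 1) := by
  have h1 := PySem.List.slice_to_natCast xs i
  have h2 := PySem.List.slice_from xs (a := (i : Int) + 1) (by omega)
  have ht : ((i : Int) + 1).toNat = i + 1 := by omega
  rw [h1, h2, ht]

lemma pvRestLen (xs : List String) (i : Nat) (hi : i < xs.length) :
    (xs.take i ++ xs.drop (i + 1)).length = xs.length - 1 := by
  simp only [List.length_append, List.length_take, List.length_drop]
  omega

lemma pvStep_append (l₁ l₂ : List (String × List String)) :
    pvStep (l₁ ++ l₂) = pvStep l₁ ++ pvStep l₂ := by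
  simp [pvStep]

lemma pvStep_iterate_nil (k : Nat) : pvStep^[k] ([] : List (String × List String)) = [] := by
  induction k with
  | zero => rfl
  | succ k ih => rw [Function.iterate_succ_apply, show pvStep [] = [] from rfl, ih]

lemma pvStep_iterate_append (k : Nat) (l₁ l₂ : List (String × List String)) :
    pvStep^[k] (l₁ ++ l₂) = pvStep^[k] l₁ ++ pvStep^[k] l₂ := by
  induction k generalizing l₁ l₂ with
  | zero => rfl
  | succ k ih => rw [Function.iterate_succ_apply, Function.iterate_succ_apply,
      Function.iterate_succ_apply, pvStep_append, ih]

lemma pvStep_iterate_flatMap (k : Nat) (l : List (String × List String)) :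
    pvStep^[k] l = l.flatMap (fun x => pvStep^[k] [x]) := by
  induction l with
  | nil => simp [pvStep_iterate_nil]
  | cons x xs ih =>
      rw [show x :: xs = [x] ++ xs from rfl, pvStep_iterate_append, ih]
      simp

lemma pvFoldlRangeIterate (n : Nat) (x : List (String × List String)) :
    (List.range n).foldl (fun fr _ => pvStep fr) x = pvStep^[n] x := by
  induction n with
  | zero => rfl
  | succ n ih => rw [List.range_succ, List.foldl_append, ih, Function.iterate_succ_apply']; rfl

-- flatMap over an attached list, by the underlying values
lemma pvFlatMapAttach {α β : Type} (l : List α) (g : α → List β) :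
    l.attach.flatMap (fun i => g i.1) = l.flatMap g := by
  conv_rhs => rw [← List.attach_map_subtype_val l]
  rw [List.flatMap_map]

-- A's outer loop over attached indices, with its accumulator made explicit
lemma pvAfoldl (xs : List String) (l : List {x // x ∈ List.range xs.length})
    (acc : List String) :
    l.foldl (fun result i =>
        (create_possible_number
            (PySem.List.slice xs none (some (i.1 : Int)) ++
              PySem.List.slice xs (some ((i.1 : Int) + 1)) none)).foldl
          (fun r j => r ++ [PySem.List.pyGetD xs (i.1 : Int) "" ++ j]) result) acc
    = acc ++ l.flatMap (fun i =>
        (create_possible_number (xs.take i.1 ++ xs.drop (i.1 + 1))).map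
          (fun j => xs.getD i.1 "" ++ j)) := by
  induction l generalizing acc with
  | nil => simp
  | cons x t ih =>
      rw [List.foldl_cons, ih, List.flatMap_cons, pvSlicePair,
        PySem.List.foldl_append_singleton_eq_map]
      simp [PySem.List.pyGetD_natCast, List.append_assoc]

-- A on a list of length ≥ 2, as a flatMap over the chosen first index
lemma pvA_unfold (xs : List String) (h : 2 ≤ xs.length) :
    create_possible_number xs =
      (List.range xs.length).flatMap (fun i =>
        (create_possible_number (xs.take i ++ xs.drop (i + 1))).map
          (fun j => xs.getD i "" ++ j)) := by
  conv_lhs => rw [create_possible_number]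
  rw [if_neg (by omega), if_neg (by omega), pvAfoldl, List.nil_append]
  exact pvFlatMapAttach (List.range xs.length)
    (fun i => (create_possible_number (xs.take i ++ xs.drop (i + 1))).map
      (fun j => xs.getD i "" ++ j))

-- the frontier invariant: n steps from (p, rem) with |rem| = n ≥ 1 produce A's results prefixed by p
lemma pvKey (n : Nat) : ∀ (p : String) (rem : List String), rem.length = n → 1 ≤ n →
    (pvStep^[n] [(p, rem)]).map Prod.fst =
      (create_possible_number rem).map (fun j => p ++ j) := by
  induction n using Nat.strong_induction_on with
  | _ n ih =>
    intro p rem hlen hn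
    rcases Nat.lt_or_ge n 2 with h2 | h2
    · -- n = 1
      have hn1 : n = 1 := by omega
      subst hn1
      obtain ⟨x, rfl⟩ := List.length_eq_one_iff.mp hlen
      conv_rhs => rw [create_possible_number]
      simp [pvStep, PySem.List.pyGetD_natCast]
    · -- n ≥ 2
      obtain ⟨m, rfl⟩ : ∃ m, n = m + 1 := ⟨n - 1, by omega⟩
      rw [Function.iterate_succ_apply]
      have hstep : pvStep [(p, rem)] =
          (List.range rem.length).map (fun i =>
            (p ++ rem.getD i "", rem.take i ++ rem.drop (i + 1))) := by
        simp only [pvStep, List.flatMap_cons, List.flatMap_nil, List.append_nil]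
        apply List.map_congr_left
        intro i hi
        rw [pvSlicePair]
        simp [PySem.List.pyGetD_natCast]
      rw [hstep, pvStep_iterate_flatMap, List.flatMap_map, List.map_flatMap]
      rw [pvA_unfold rem (by omega), List.map_flatMap]
      apply List.flatMap_congr
      intro i hi
      have hi' : i < rem.length := List.mem_range.mp hi
      rw [ih m (by omega) (p ++ rem.getD i "") (rem.take i ++ rem.drop (i + 1))
        (by rw [pvRestLen rem i hi']; omega) (by omega)]
      simp [List.map_map, Function.comp, String.append_assoc]

lemma pvMapEmptyPrefix (l : List String) : l.map (fun j => "" ++ j) = l := by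
  induction l with
  | nil => rfl
  | cons x xs ih => rw [List.map_cons, String.empty_append, ih]

-- ===== VERDICT (by name: the statement is the Claim_ definition above) =====
theorem create_possible_number_spec : Claim_equal_create_possible_number := by
  intro input_list _
  unfold Spec_create_possible_number create_possible_number_alt
  by_cases h : input_list = []
  · subst h; unfold create_possible_number; simp
  · rw [if_neg h, pvFoldlRangeIterate,
      pvKey input_list.length "" input_list rfl (List.length_pos_iff.mpr h)]
    exact (pvMapEmptyPrefix (create_possible_number input_list)).symm
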